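-- pv_equiv track=rewrite | github.com/Kuree/LEAFS | test/benchmark_query.py | split_into_chunk
-- ===== SOURCE A (Python) =====
-- def split_into_chunk(data, interval):
--     result = []
--     chunk = []
--     pre_timestamp = data[0][0] # the first time stamp in a chunk
--     for data_point in data:
--         timestamp = data_point[0]
--         value = data_point[1]
--         if timestamp < pre_timestamp + interval:
--             chunk.append(data_point)
--         else:
--             result.append(chunk)
--             chunk = [data_point]
--             pre_timestamp = timestamp
--     result.append(chunk)
--     return result
-- ===== SOURCE B (Python) =====
-- def split_into_chunk(data, interval):
--     pre_timestamp = data[0][0]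
--     bounds = [0]
--     for index, data_point in enumerate(data):
--         if data_point[0] >= pre_timestamp + interval:
--             bounds.append(index)
--             pre_timestamp = data_point[0]
--     bounds.append(len(data))
--     return [data[start:stop] for start, stop in zip(bounds, bounds[1:])]
-- ===== Notes on version B (the rewrite author's own statement) =====
-- stated objective: alternative
-- what changed: Replaces A's single loop that accumulates the current chunk and result lists by a two-pass decomposition: one pass over enumerate(data) collecting the chunk-boundary indices, then slicing data at consecutive boundaries with zip(bounds, bounds[1:]).
import Mathlib
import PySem

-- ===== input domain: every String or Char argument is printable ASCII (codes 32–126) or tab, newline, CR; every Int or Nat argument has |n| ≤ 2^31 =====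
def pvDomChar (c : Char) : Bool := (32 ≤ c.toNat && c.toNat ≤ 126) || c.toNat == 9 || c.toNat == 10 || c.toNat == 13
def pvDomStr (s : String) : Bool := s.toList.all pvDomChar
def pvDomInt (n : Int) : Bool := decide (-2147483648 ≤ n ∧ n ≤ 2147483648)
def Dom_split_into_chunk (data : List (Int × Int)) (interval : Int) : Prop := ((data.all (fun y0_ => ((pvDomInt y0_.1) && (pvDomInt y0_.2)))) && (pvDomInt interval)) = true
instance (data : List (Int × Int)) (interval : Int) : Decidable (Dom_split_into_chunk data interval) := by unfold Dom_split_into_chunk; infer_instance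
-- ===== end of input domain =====

-- B replaces A's chunk-accumulator loop by a two-pass decomposition (collect chunk start
-- indices, then slice); same return value, no speed claim (objective: alternative).

-- ===== PORT A =====
-- One fold over data carrying (result, chunk, pre_timestamp), then a final append of chunk.
-- data[0][0] raises IndexError on empty data: excluded by Pre_; the [] branch is a totality guard.
def split_into_chunk (data : List (Int × Int)) (interval : Int) : List (List (Int × Int)) :=
  match data with
  | [] => []
  | (t0, _) :: _ =>
    let s := data.foldl
      (fun (st : List (List (Int × Int)) × List (Int × Int) × Int) dp =>
        if dp.1 < st.2.2 + interval then (st.1, st.2.1 ++ [dp], st.2.2)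
        else (st.1 ++ [st.2.1], [dp], dp.1))
      ([], [], t0)
    s.1 ++ [s.2.1]

-- ===== PORT B =====
-- Pass 1: fold over enumerate(data) collecting boundary indices (state = (bounds, pre_timestamp));
-- pass 2: slice data at consecutive bounds (zip(bounds, bounds[1:])).
-- data[0][0] raises IndexError on empty data: excluded by Pre_; the [] branch is a totality guard.
def split_into_chunk_alt (data : List (Int × Int)) (interval : Int) : List (List (Int × Int)) :=
  match data with
  | [] => []
  | (t0, _) :: _ =>
    let s := (PySem.List.enumerate data).foldl
      (fun (st : List Int × Int) p =>
        if p.2.1 ≥ st.2 + interval then (st.1 ++ [p.1], p.2.1) else st)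
      ([(0 : Int)], t0)
    let bounds := s.1 ++ [(data.length : Int)]
    (bounds.zip bounds.tail).map (fun q => PySem.List.slice data (some q.1) (some q.2))

-- ===== PRECONDITION & SPEC =====
-- Pre_ excludes only the empty list, on which both Pythons raise IndexError at data[0][0].
def Pre_split_into_chunk (data : List (Int × Int)) (interval : Int) : Prop := data ≠ []
instance (data : List (Int × Int)) (interval : Int) : Decidable (Pre_split_into_chunk data interval) := by unfold Pre_split_into_chunk; infer_instance
def pvWitness_split_into_chunk : (List (Int × Int)) × Int := ([(0, 1), (2, 3), (5, 4)], 3)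

def Spec_split_into_chunk (data : List (Int × Int)) (interval : Int) (out : List (List (Int × Int))) : Prop := out = split_into_chunk_alt data interval
instance (data : List (Int × Int)) (interval : Int) (out : List (List (Int × Int))) : Decidable (Spec_split_into_chunk data interval out) := by unfold Spec_split_into_chunk; infer_instance

-- ===== CLAIM (what is proved, stated in full; the proofs are below) =====
def Claim_equal_split_into_chunk : Prop := ∀ (data : List (Int × Int)) (interval : Int), Dom_split_into_chunk data interval → Pre_split_into_chunk data interval → Spec_split_into_chunk data interval (split_into_chunk data interval)

-- ===== LEMMAS AND PROOFS =====

-- Reference recursion: chunking with current chunk `cur` and current chunk-head timestamp `pre`.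
def chunksRec (interval pre : Int) (cur : List (Int × Int)) : List (Int × Int) → List (List (Int × Int))
  | [] => [cur]
  | p :: rest =>
    if p.1 < pre + interval then chunksRec interval pre (cur ++ [p]) rest
    else cur :: chunksRec interval p.1 [p] rest

-- The boundary indices B's first pass produces after `acc`, as a recursion.
def boundsFrom (interval : Int) (i pre : Int) : List (Int × Int) → List Int
  | [] => []
  | p :: rest =>
    if p.1 ≥ pre + interval then i :: boundsFrom interval (i + 1) p.1 rest
    else boundsFrom interval (i + 1) pre rest

-- Consecutive slices of D starting at j through the boundary list, last slice to D.length.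
def sliceChain (D : List (Int × Int)) (j : Int) : List Int → List (List (Int × Int))
  | [] => [PySem.List.slice D (some j) (some (D.length : Int))]
  | b :: rest => PySem.List.slice D (some j) (some b) :: sliceChain D b rest

theorem foldA_eq_chunksRec (interval : Int) (l : List (Int × Int)) :
    ∀ (res : List (List (Int × Int))) (cur : List (Int × Int)) (pre : Int),
      (l.foldl
        (fun (st : List (List (Int × Int)) × List (Int × Int) × Int) dp =>
          if dp.1 < st.2.2 + interval then (st.1, st.2.1 ++ [dp], st.2.2)
          else (st.1 ++ [st.2.1], [dp], dp.1))
        (res, cur, pre)).1 ++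
      [(l.foldl
        (fun (st : List (List (Int × Int)) × List (Int × Int) × Int) dp =>
          if dp.1 < st.2.2 + interval then (st.1, st.2.1 ++ [dp], st.2.2)
          else (st.1 ++ [st.2.1], [dp], dp.1))
        (res, cur, pre)).2.1] = res ++ chunksRec interval pre cur l := by
  induction l with
  | nil => intro res cur pre; simp [chunksRec]
  | cons p rest ih =>
    intro res cur pre
    by_cases h : p.1 < pre + interval
    · simp only [List.foldl_cons, chunksRec, if_pos h]
      exact ih res (cur ++ [p]) pre
    · simp only [List.foldl_cons, chunksRec, if_neg h]
      rw [ih (res ++ [cur]) [p] p.1]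
      simp

theorem foldB_eq_boundsFrom (interval : Int) (l : List (Int × Int)) :
    ∀ (i : Int) (acc : List Int) (pre : Int),
      ((PySem.List.enumerate l i).foldl
        (fun (st : List Int × Int) p =>
          if p.2.1 ≥ st.2 + interval then (st.1 ++ [p.1], p.2.1) else st)
        (acc, pre)).1 = acc ++ boundsFrom interval i pre l := by
  induction l with
  | nil => intro i acc pre; simp [PySem.List.enumerate_nil, boundsFrom]
  | cons p rest ih =>
    intro i acc pre
    rw [PySem.List.enumerate_cons]
    by_cases h : p.1 ≥ pre + interval
    · simp only [List.foldl_cons, boundsFrom, if_pos h]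
      rw [ih (i + 1) (acc ++ [i]) p.1]
      simp
    · simp only [List.foldl_cons, boundsFrom, if_neg h]
      exact ih (i + 1) acc pre

theorem zip_slices_eq_sliceChain (D : List (Int × Int)) (bs : List Int) :
    ∀ (j : Int),
      (((j :: (bs ++ [(D.length : Int)])).zip (bs ++ [(D.length : Int)])).map
        (fun q => PySem.List.slice D (some q.1) (some q.2))) = sliceChain D j bs := by
  induction bs with
  | nil => intro j; simp [sliceChain]
  | cons b rest ih =>
    intro j
    simp only [List.cons_append, List.zip_cons_cons, List.map_cons, sliceChain]
    rw [← ih b]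

theorem sliceChain_boundsFrom (interval : Int) (D : List (Int × Int)) :
    ∀ (l : List (Int × Int)) (i j : Nat) (cur : List (Int × Int)) (pre : Int),
      cur = (D.drop j).take (i - j) → l = D.drop i → j ≤ i → i ≤ D.length →
      sliceChain D (j : Int) (boundsFrom interval (i : Int) pre l) = chunksRec interval pre cur l := by
  intro l
  induction l with
  | nil =>
    intro i j cur pre hcur hl hji hiD
    have hi : i = D.length := by
      have := congrArg List.length hl
      simp [List.length_drop] at this
      omega
    subst hi
    simp [boundsFrom, sliceChain, chunksRec, PySem.List.slice_natCast, hcur]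
  | cons p rest ih =>
    intro i j cur pre hcur hl hji hiD
    have hiD' : i < D.length := by
      by_contra hc
      rw [List.drop_eq_nil_of_le (by omega)] at hl
      exact List.cons_ne_nil _ _ hl
    rw [List.drop_eq_getElem_cons hiD'] at hl
    injection hl with hp hrest
    have hcast : ((i : Int) + 1) = ((i + 1 : Nat) : Int) := by push_cast; ring
    by_cases h : p.1 ≥ pre + interval
    · simp only [boundsFrom, if_pos h, sliceChain, chunksRec,
        if_neg (by omega : ¬ p.1 < pre + interval)]
      have hslice : PySem.List.slice D (some (j : Int)) (some (i : Int)) = cur := by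
        rw [PySem.List.slice_natCast, hcur]
      have hpl : [p] = List.take (i + 1 - i) (List.drop i D) := by
        rw [show i + 1 - i = 1 by omega, hp, List.take_one, List.head?_drop,
          List.getElem?_eq_getElem hiD']
        rfl
      rw [hslice, hcast, ih (i + 1) i [p] p.1 hpl hrest (by omega) (by omega)]
    · simp only [boundsFrom, if_neg h, chunksRec,
        if_pos (by omega : p.1 < pre + interval)]
      rw [hcast]
      apply ih (i + 1) j (cur ++ [p]) pre _ hrest (by omega) (by omega)
      rw [hcur, show i + 1 - j = (i - j) + 1 by omega, List.take_add_one]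
      simp [List.getElem?_drop, show j + (i - j) = i by omega, hp, hiD']

-- ===== VERDICT (by name: the statement is the Claim_ definition above) =====
theorem split_into_chunk_spec : Claim_equal_split_into_chunk := by
  intro data interval _ hpre
  unfold Spec_split_into_chunk split_into_chunk split_into_chunk_alt
  match data, hpre with
  | (t0, v0) :: tl, _ =>
    simp only
    rw [foldB_eq_boundsFrom]
    rw [show ([(0 : Int)] ++ boundsFrom interval 0 t0 ((t0, v0) :: tl)) ++ [(((t0, v0) :: tl).length : Int)]
          = (0 : Int) :: (boundsFrom interval 0 t0 ((t0, v0) :: tl) ++ [(((t0, v0) :: tl).length : Int)]) by simp]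
    rw [List.tail_cons, zip_slices_eq_sliceChain]
    have hs := sliceChain_boundsFrom interval ((t0, v0) :: tl) ((t0, v0) :: tl) 0 0 [] t0
      (by simp) (by simp) (le_refl _) (by simp)
    simp only [Nat.cast_zero] at hs
    rw [hs]
    have ha := foldA_eq_chunksRec interval ((t0, v0) :: tl) [] [] t0
    simpa using ha
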